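-- pv_equiv track=rewrite | github.com/BramDevlaminck/DiscreteAlgorithmsCombinatorialGeneration | integer_partitions.py | enum_partitions
-- ===== SOURCE A (Python) =====
-- def enum_partitions(m: int, n: int) -> list[list[int]]:
--     """Algorithm 3.5"""
--
--     # initialize and use n+1 and m+1 since in the pseudocode the end is included
--     matrix = [[0 for _ in range(n + 1)] for _ in range(m + 1)]
--     matrix[0][0] = 1
--
--     for i in range(1, m + 1):
--         for j in range(1, min(i, n) + 1):
--             matrix[i][j] = matrix[i - 1][j - 1]
--             if not (i < 2 * j):
--                 matrix[i][j] += matrix[i - j][j]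
--     return matrix
-- ===== SOURCE B (Python) =====
-- def enum_partitions(m: int, n: int) -> list[list[int]]:
--     # a[i][j] = number of partitions of i into AT MOST j parts
--     a = [[0] * (n + 1) for _ in range(m + 1)]
--     for j in range(n + 1):
--         a[0][j] = 1
--     for i in range(1, m + 1):
--         for j in range(1, n + 1):
--             a[i][j] = a[i][j - 1] + (a[i - j][j] if i >= j else 0)
--     # a partition of i into exactly j parts <-> a partition of i-j into at most j parts
--     return [
--         [a[i - j][j] if 1 <= j <= min(i, n) else (1 if i == 0 and j == 0 else 0)
--          for j in range(n + 1)]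
--         for i in range(m + 1)
--     ]
-- ===== Notes on version B (the rewrite author's own statement) =====
-- stated objective: alternative
-- what changed: B replaces A's in-place diagonal recurrence on exact-partition counts by first building an auxiliary at-most-j-parts table via a[i][j] = a[i][j-1] + a[i-j][j] and then producing the result matrix in a second pass as matrix[i][j] = a[i-j][j], using the exactly-j <-> at-most-j bijection.
import Mathlib
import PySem

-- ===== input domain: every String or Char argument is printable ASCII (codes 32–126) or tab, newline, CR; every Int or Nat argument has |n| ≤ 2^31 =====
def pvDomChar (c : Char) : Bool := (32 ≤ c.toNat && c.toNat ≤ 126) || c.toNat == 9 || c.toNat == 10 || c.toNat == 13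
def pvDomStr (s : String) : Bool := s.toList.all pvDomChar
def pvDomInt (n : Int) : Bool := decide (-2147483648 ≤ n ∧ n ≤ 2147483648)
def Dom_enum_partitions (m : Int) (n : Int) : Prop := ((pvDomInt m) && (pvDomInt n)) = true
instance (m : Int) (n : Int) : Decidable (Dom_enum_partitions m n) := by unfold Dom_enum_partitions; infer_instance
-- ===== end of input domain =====

-- B builds an at-most-j-parts table and reads the answer off it in a second pass,
-- instead of A's in-place diagonal recurrence on exact-partition counts (objective: alternative).

-- ===== PORT A =====
-- matrix[i][j] read/write; total via pyGetD/pySetD (all indices are in range under Pre_)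
def pvGet2 (mat : List (List Int)) (i j : Int) : Int :=
  PySem.List.pyGetD (PySem.List.pyGetD mat i []) j 0

def pvSet2 (mat : List (List Int)) (i j : Int) (v : Int) : List (List Int) :=
  PySem.List.pySetD mat i (PySem.List.pySetD (PySem.List.pyGetD mat i []) j v)

def enum_partitions (m : Int) (n : Int) : List (List Int) :=
  let matrix := (PySem.List.pyRange 0 (m + 1) 1).map
    (fun _ => (PySem.List.pyRange 0 (n + 1) 1).map (fun _ => (0 : Int)))
  let matrix := pvSet2 matrix 0 0 1
  (PySem.List.pyRange 1 (m + 1) 1).foldl (fun mat i =>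
    (PySem.List.pyRange 1 (min i n + 1) 1).foldl (fun mat j =>
      let mat := pvSet2 mat i j (pvGet2 mat (i - 1) (j - 1))
      if ¬ (i < 2 * j) then pvSet2 mat i j (pvGet2 mat i j + pvGet2 mat (i - j) j) else mat)
      mat)
    matrix

-- ===== PORT B =====
def enum_partitions_alt (m : Int) (n : Int) : List (List Int) :=
  let a := (PySem.List.pyRange 0 (m + 1) 1).map
    (fun _ => (PySem.List.pyRange 0 (n + 1) 1).map (fun _ => (0 : Int)))
  let a := (PySem.List.pyRange 0 (n + 1) 1).foldl (fun a j => pvSet2 a 0 j 1) a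
  let a := (PySem.List.pyRange 1 (m + 1) 1).foldl (fun a i =>
    (PySem.List.pyRange 1 (n + 1) 1).foldl (fun a j =>
      pvSet2 a i j (pvGet2 a i (j - 1) + if j ≤ i then pvGet2 a (i - j) j else 0)) a) a
  (PySem.List.pyRange 0 (m + 1) 1).map (fun i =>
    (PySem.List.pyRange 0 (n + 1) 1).map (fun j =>
      if 1 ≤ j ∧ j ≤ min i n then pvGet2 a (i - j) j
      else if i = 0 ∧ j = 0 then 1 else 0))

-- ===== PRECONDITION & SPEC =====
-- Pre_ excludes exactly the inputs where A raises IndexError: a negative m or n makes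
-- 'matrix[0][0] = 1' hit an empty list / empty row.
def Pre_enum_partitions (m : Int) (n : Int) : Prop := 0 ≤ m ∧ 0 ≤ n
instance (m : Int) (n : Int) : Decidable (Pre_enum_partitions m n) := by
  unfold Pre_enum_partitions; infer_instance

def pvWitness_enum_partitions : Int × Int := (6, 4)

def Spec_enum_partitions (m : Int) (n : Int) (out : List (List Int)) : Prop :=
  out = enum_partitions_alt m n
instance (m : Int) (n : Int) (out : List (List Int)) : Decidable (Spec_enum_partitions m n out) := by
  unfold Spec_enum_partitions; infer_instance

-- ===== CLAIM (what is proved, stated in full; the proofs are below) =====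
def Claim_equal_enum_partitions : Prop := ∀ (m : Int) (n : Int), Dom_enum_partitions m n →
  Pre_enum_partitions m n → Spec_enum_partitions m n (enum_partitions m n)

-- ===== LEMMAS AND PROOFS =====

def mkMat (M N : Nat) (f : Nat → Nat → Int) : List (List Int) :=
  (List.range (M + 1)).map (fun i => (List.range (N + 1)).map (f i))

def upd2 (f : Nat → Nat → Int) (a b : Nat) (v : Int) : Nat → Nat → Int :=
  fun x y => if x = a ∧ y = b then v else f x y

theorem mkMat_congr (M N : Nat) (f g : Nat → Nat → Int)
    (h : ∀ i ≤ M, ∀ j ≤ N, f i j = g i j) : mkMat M N f = mkMat M N g := by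
  unfold mkMat
  refine List.map_congr_left (fun i hi => ?_)
  refine List.map_congr_left (fun j hj => ?_)
  exact h i (by simpa using Nat.lt_succ_iff.mp (List.mem_range.mp hi)) j
    (by simpa using Nat.lt_succ_iff.mp (List.mem_range.mp hj))

theorem get2_mk (M N : Nat) (f : Nat → Nat → Int) (i j : Int)
    (hi0 : 0 ≤ i) (hi : i ≤ (M : Int)) (hj0 : 0 ≤ j) (hj : j ≤ (N : Int)) :
    pvGet2 (mkMat M N f) i j = f i.toNat j.toNat := by
  unfold pvGet2 mkMat
  rw [PySem.List.pyGetD_eq_getElem _ _ hi0 (by simp; omega)]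
  rw [List.getElem_map, List.getElem_range]
  rw [PySem.List.pyGetD_eq_getElem _ _ hj0 (by simp; omega)]
  rw [List.getElem_map, List.getElem_range]

theorem set2_mk (M N : Nat) (f : Nat → Nat → Int) (i j : Int) (v : Int)
    (hi0 : 0 ≤ i) (hi : i ≤ (M : Int)) (hj0 : 0 ≤ j) (hj : j ≤ (N : Int)) :
    pvSet2 (mkMat M N f) i j v = mkMat M N (upd2 f i.toNat j.toNat v) := by
  unfold pvSet2 mkMat
  rw [PySem.List.pyGetD_eq_getElem _ _ hi0 (by simp; omega)]
  rw [List.getElem_map, List.getElem_range]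
  rw [PySem.List.pySetD_of_nonneg _ _ hj0, PySem.List.pySetD_of_nonneg _ _ hi0]
  apply List.ext_getElem
  · simp
  · intro k hk1 hk2
    simp only [List.getElem_set, List.getElem_map, List.getElem_range]
    by_cases hki : k = i.toNat
    · subst hki
      rw [if_pos rfl]
      apply List.ext_getElem
      · simp
      · intro t ht1 ht2
        simp only [List.getElem_set, List.getElem_map, List.getElem_range, upd2]
        by_cases htj : t = j.toNat
        · subst htj; simp
        · rw [if_neg (fun h => htj h.symm), if_neg (fun h => htj h.2)]
    · rw [if_neg (fun h => hki h.symm)]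
      apply List.map_congr_left
      intro t ht
      simp only [upd2]
      rw [if_neg (fun h => hki h.1)]

def pM (i j : Nat) : Int :=
  if i = 0 then 1
  else if j = 0 then 0
  else pM i (j - 1) + (if j ≤ i then pM (i - j) j else 0)
termination_by (i, j)
decreasing_by
  · exact Prod.Lex.right i (by omega)
  · exact Prod.Lex.left _ _ (by omega)

def pE (i j : Nat) : Int :=
  if i = 0 then (if j = 0 then 1 else 0)
  else if j = 0 then 0
  else if i < j then 0
  else pE (i - 1) (j - 1) + (if 2 * j ≤ i then pE (i - j) j else 0)
termination_by i
decreasing_by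
  · omega
  · omega

theorem pE_diag (k : Nat) : pE k k = 1 := by
  induction k with
  | zero => rw [pE]; simp
  | succ k ih =>
    rw [pE]
    rw [if_neg (by omega), if_neg (by omega), if_neg (by omega), if_neg (by omega)]
    simpa using ih

theorem pE_eq_pM (i : Nat) : ∀ j, 1 ≤ j → j ≤ i → pE i j = pM (i - j) j := by
  induction i using Nat.strong_induction_on with
  | _ i ih =>
    intro j h1 h2
    by_cases hij : i = j
    · subst hij
      rw [pE_diag, Nat.sub_self, pM]
      simp
    · have hlt : j < i := by omega
      rw [pE, if_neg (by omega), if_neg (by omega), if_neg (by omega)]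
      have e1 : pE (i - 1) (j - 1) = pM (i - j) (j - 1) := by
        by_cases hj1 : j = 1
        · subst hj1
          rw [pE, if_neg (by omega), if_pos rfl]
          rw [pM, if_neg (by omega), if_pos rfl]
        · rw [ih (i - 1) (by omega) (j - 1) (by omega) (by omega)]
          congr 1
          omega
      rw [e1]
      by_cases h2j : 2 * j ≤ i
      · rw [if_pos h2j, ih (i - j) (by omega) j h1 (by omega)]
        conv_rhs => rw [pM]
        rw [if_neg (by omega), if_neg (by omega), if_pos (by omega)]
      · rw [if_neg h2j]
        conv_rhs => rw [pM]
        rw [if_neg (by omega), if_neg (by omega), if_neg (by omega)]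

theorem pM_zero_left (j : Nat) : pM 0 j = 1 := by rw [pM]; simp

theorem pM_zero_right (i : Nat) (h : 1 ≤ i) : pM i 0 = 0 := by
  rw [pM, if_neg (by omega), if_pos rfl]

theorem pE_zero_right (i : Nat) : pE i 0 = if i = 0 then 1 else 0 := by
  by_cases h : i = 0
  · subst h; rw [pE]; simp
  · rw [pE, if_neg h, if_pos rfl, if_neg h]

-- B's row-0 initialisation loop
theorem B_row0 (M N : Nat) (t : Nat) (ht : t ≤ N + 1) :
    (PySem.List.pyRange 0 (t : Int) 1).foldl (fun a j => pvSet2 a 0 j 1)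
      (mkMat M N (fun _ _ => 0))
    = mkMat M N (fun i j => if i = 0 ∧ j < t then 1 else 0) := by
  induction t with
  | zero =>
    rw [PySem.List.pyRange_one_eq_nil (by omega)]
    simp only [List.foldl_nil]
    exact mkMat_congr _ _ _ _ (fun i hi j hj => by simp)
  | succ t ih =>
    rw [show ((t + 1 : Nat) : Int) = (t : Int) + 1 by push_cast; ring]
    rw [PySem.List.pyRange_one_succ_right (by omega), List.foldl_append]
    rw [ih (by omega)]
    simp only [List.foldl_cons, List.foldl_nil]
    rw [set2_mk M N _ _ _ _ (by omega) (by omega) (by omega) (by omega)]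
    refine mkMat_congr _ _ _ _ (fun i hi j hj => ?_)
    simp only [upd2, Int.toNat_natCast, Int.toNat_zero]
    split_ifs <;> omega

-- value of B's completed auxiliary table after the first k+... rows (rows ≤ k filled)
def fB (k : Nat) : Nat → Nat → Int :=
  fun i j => if i ≤ k ∨ j = 0 then pM i j else 0

def gB (k t : Nat) : Nat → Nat → Int :=
  fun i j => if i = k + 1 ∧ 1 ≤ j ∧ j ≤ t then pM i j else fB k i j

theorem B_inner (M N k : Nat) (hk : k + 1 ≤ M) (t : Nat) (ht : t ≤ N) :
    (PySem.List.pyRange 1 ((t : Int) + 1) 1).foldl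
      (fun a j => pvSet2 a ((k : Int) + 1) j
        (pvGet2 a ((k : Int) + 1) (j - 1) +
          if j ≤ (k : Int) + 1 then pvGet2 a ((k : Int) + 1 - j) j else 0))
      (mkMat M N (fB k))
    = mkMat M N (gB k t) := by
  induction t with
  | zero =>
    rw [PySem.List.pyRange_one_eq_nil (by omega)]
    simp only [List.foldl_nil]
    exact mkMat_congr _ _ _ _ (fun i hi j hj => by simp [gB]; intro h1 h2 h3; omega)
  | succ t ih =>
    rw [show ((t + 1 : Nat) : Int) + 1 = ((t : Int) + 1) + 1 by push_cast; ring]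
    rw [PySem.List.pyRange_one_succ_right (by omega), List.foldl_append]
    rw [ih (by omega)]
    simp only [List.foldl_cons, List.foldl_nil]
    -- the two reads
    rw [get2_mk M N _ _ _ (by omega) (by omega) (by omega) (by omega)]
    have hread1 : gB k t ((k : Int) + 1).toNat ((t : Int) + 1 - 1).toNat = pM (k + 1) t := by
      have e1 : ((k : Int) + 1).toNat = k + 1 := by omega
      have e2 : ((t : Int) + 1 - 1).toNat = t := by omega
      rw [e1, e2]
      by_cases h0 : t = 0
      · subst h0; simp [gB, fB, pM_zero_right]
      · simp [gB, h0]
    rw [hread1]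
    by_cases hle : (t : Int) + 1 ≤ (k : Int) + 1
    · rw [if_pos hle, get2_mk M N _ _ _ (by omega) (by omega) (by omega) (by omega)]
      have hread2 : gB k t ((k : Int) + 1 - ((t : Int) + 1)).toNat ((t : Int) + 1).toNat
          = pM (k - t) (t + 1) := by
        have e1 : ((k : Int) + 1 - ((t : Int) + 1)).toNat = k - t := by omega
        have e2 : ((t : Int) + 1).toNat = t + 1 := by omega
        rw [e1, e2]
        simp only [gB, fB]
        rw [if_neg (by omega), if_pos (by omega)]
      rw [hread2]
      rw [set2_mk M N _ _ _ _ (by omega) (by omega) (by omega) (by omega)]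
      refine mkMat_congr _ _ _ _ (fun i hi j hj => ?_)
      have hv : pM (k + 1) t + pM (k - t) (t + 1) = pM (k + 1) (t + 1) := by
        conv_rhs => rw [pM]
        rw [if_neg (by omega), if_neg (by omega), if_pos (by omega)]
        have : k + 1 - (t + 1) = k - t := by omega
        rw [this]
        simp
      simp only [upd2, gB, fB]
      have e1 : ((k : Int) + 1).toNat = k + 1 := by omega
      have e2 : ((t : Int) + 1).toNat = t + 1 := by omega
      rw [e1, e2]
      split_ifs <;> first | rw [← hv] | rfl | omega | simp_all <;> omega
    · rw [if_neg hle]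
      rw [set2_mk M N _ _ _ _ (by omega) (by omega) (by omega) (by omega)]
      refine mkMat_congr _ _ _ _ (fun i hi j hj => ?_)
      have hv : pM (k + 1) t + 0 = pM (k + 1) (t + 1) := by
        conv_rhs => rw [pM]
        rw [if_neg (by omega), if_neg (by omega), if_neg (by omega)]
        simp
      simp only [upd2, gB, fB]
      have e1 : ((k : Int) + 1).toNat = k + 1 := by omega
      have e2 : ((t : Int) + 1).toNat = t + 1 := by omega
      rw [e1, e2]
      split_ifs <;> first | rw [← hv] | rfl | omega | simp_all <;> omega

theorem B_outer (M N k : Nat) (hk : k ≤ M) :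
    (PySem.List.pyRange 1 ((k : Int) + 1) 1).foldl
      (fun a i => (PySem.List.pyRange 1 ((N : Int) + 1) 1).foldl
        (fun a j => pvSet2 a i j
          (pvGet2 a i (j - 1) + if j ≤ i then pvGet2 a (i - j) j else 0)) a)
      (mkMat M N (fB 0))
    = mkMat M N (fB k) := by
  induction k with
  | zero =>
    rw [show ((0 : Nat) : Int) + 1 = 1 by norm_num,
      PySem.List.pyRange_one_eq_nil (a := 1) (b := 1) (by omega)]
    simp
  | succ k ih =>
    rw [show ((k + 1 : Nat) : Int) + 1 = ((k : Int) + 1) + 1 by push_cast; ring]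
    rw [PySem.List.pyRange_one_succ_right (a := 1) (b := (k : Int) + 1) (by omega),
      List.foldl_append]
    rw [ih (by omega)]
    simp only [List.foldl_cons, List.foldl_nil]
    rw [B_inner M N k (by omega) N (le_refl _)]
    refine mkMat_congr _ _ _ _ (fun i hi j hj => ?_)
    simp only [gB, fB]
    split_ifs <;> first | rfl | omega

def fA (N k : Nat) : Nat → Nat → Int :=
  fun i j => if i = 0 ∧ j = 0 then 1
    else if i ≤ k ∧ 1 ≤ j ∧ j ≤ min i N then pE i j else 0

def gA (N k t : Nat) : Nat → Nat → Int :=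
  fun i j => if i = k + 1 ∧ 1 ≤ j ∧ j ≤ t then pE i j else fA N k i j

theorem A_inner (M N k : Nat) (hk : k + 1 ≤ M) (t : Nat) (ht : t ≤ min (k + 1) N) :
    (PySem.List.pyRange 1 ((t : Int) + 1) 1).foldl
      (fun mat j =>
        let mat := pvSet2 mat ((k : Int) + 1) j (pvGet2 mat ((k : Int) + 1 - 1) (j - 1))
        if ¬ ((k : Int) + 1 < 2 * j) then
          pvSet2 mat ((k : Int) + 1) j
            (pvGet2 mat ((k : Int) + 1) j + pvGet2 mat ((k : Int) + 1 - j) j)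
        else mat)
      (mkMat M N (fA N k))
    = mkMat M N (gA N k t) := by
  induction t with
  | zero =>
    rw [show ((0 : Nat) : Int) + 1 = 1 by norm_num,
      PySem.List.pyRange_one_eq_nil (a := 1) (b := 1) (by omega)]
    simp only [List.foldl_nil]
    exact mkMat_congr _ _ _ _ (fun i hi j hj => by simp [gA]; intro h1 h2 h3; omega)
  | succ t ih =>
    rw [show ((t + 1 : Nat) : Int) + 1 = ((t : Int) + 1) + 1 by push_cast; ring]
    rw [PySem.List.pyRange_one_succ_right (a := 1) (b := (t : Int) + 1) (by omega),
      List.foldl_append]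
    rw [ih (by omega)]
    simp only [List.foldl_cons, List.foldl_nil]
    rw [get2_mk M N _ _ _ (by omega) (by omega) (by omega) (by omega)]
    have hread1 : gA N k t ((k : Int) + 1 - 1).toNat ((t : Int) + 1 - 1).toNat = pE k t := by
      have e1 : ((k : Int) + 1 - 1).toNat = k := by omega
      have e2 : ((t : Int) + 1 - 1).toNat = t := by omega
      rw [e1, e2]
      by_cases h0 : t = 0
      · subst h0
        simp only [gA, fA]
        rw [if_neg (by omega), pE_zero_right]
        by_cases hk0 : k = 0
        · simp [hk0]
        · rw [if_neg hk0, if_neg (by omega), if_neg (by omega)]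
      · simp only [gA, fA]
        rw [if_neg (by omega), if_neg (by omega), if_pos (by omega)]
    rw [hread1]
    rw [set2_mk M N _ _ _ _ (by omega) (by omega) (by omega) (by omega)]
    by_cases hcase : 2 * (t + 1) ≤ k + 1
    · rw [if_pos (by push_cast; omega)]
      rw [get2_mk M N _ _ _ (by omega) (by omega) (by omega) (by omega)]
      rw [get2_mk M N _ _ _ (by omega) (by omega) (by omega) (by omega)]
      have e1 : ((k : Int) + 1).toNat = k + 1 := by omega
      have e2 : ((t : Int) + 1).toNat = t + 1 := by omega
      have e3 : ((k : Int) + 1 - ((t : Int) + 1)).toNat = k - t := by omega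
      have hreadself : upd2 (gA N k t) ((k : Int) + 1).toNat ((t : Int) + 1).toNat (pE k t)
          ((k : Int) + 1).toNat ((t : Int) + 1).toNat = pE k t := by
        simp [upd2]
      have hread2 : upd2 (gA N k t) ((k : Int) + 1).toNat ((t : Int) + 1).toNat (pE k t)
          ((k : Int) + 1 - ((t : Int) + 1)).toNat ((t : Int) + 1).toNat = pE (k - t) (t + 1) := by
        rw [e1, e2, e3]
        simp only [upd2, gA, fA]
        rw [if_neg (by omega), if_neg (by omega), if_neg (by omega), if_pos (by omega)]
      rw [hreadself, hread2]
      rw [set2_mk M N _ _ _ _ (by omega) (by omega) (by omega) (by omega)]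
      refine mkMat_congr _ _ _ _ (fun i hi j hj => ?_)
      have hv : pE k t + pE (k - t) (t + 1) = pE (k + 1) (t + 1) := by
        conv_rhs => rw [pE]
        rw [if_neg (by omega), if_neg (by omega), if_neg (by omega), if_pos (by omega)]
        have e4 : k + 1 - 1 = k := by omega
        have e5 : t + 1 - 1 = t := by omega
        have e6 : k + 1 - (t + 1) = k - t := by omega
        rw [e4, e5, e6]
      simp only [upd2, e1, e2]
      by_cases hij : i = k + 1 ∧ j = t + 1
      · rw [if_pos hij]
        obtain ⟨hi', hj'⟩ := hij
        simp only [gA]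
        rw [if_pos ⟨hi', by omega, by omega⟩, hi', hj']
        exact hv
      · rw [if_neg hij, if_neg hij]
        simp only [gA, fA]
        split_ifs <;> first | rfl | omega
    · rw [if_neg (by push_cast; omega)]
      refine mkMat_congr _ _ _ _ (fun i hi j hj => ?_)
      have hv : pE k t = pE (k + 1) (t + 1) := by
        conv_rhs => rw [pE]
        rw [if_neg (by omega), if_neg (by omega), if_neg (by omega), if_neg (by omega)]
        have e4 : k + 1 - 1 = k := by omega
        have e5 : t + 1 - 1 = t := by omega
        rw [e4, e5]
        simp
      have e1 : ((k : Int) + 1).toNat = k + 1 := by omega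
      have e2 : ((t : Int) + 1).toNat = t + 1 := by omega
      simp only [upd2, e1, e2]
      by_cases hij : i = k + 1 ∧ j = t + 1
      · rw [if_pos hij]
        obtain ⟨hi', hj'⟩ := hij
        simp only [gA]
        rw [if_pos ⟨hi', by omega, by omega⟩, hi', hj']
        exact hv
      · rw [if_neg hij]
        simp only [gA, fA]
        split_ifs <;> first | rfl | omega

theorem A_outer (M N k : Nat) (hk : k ≤ M) :
    (PySem.List.pyRange 1 ((k : Int) + 1) 1).foldl
      (fun mat i =>
        (PySem.List.pyRange 1 (min i (N : Int) + 1) 1).foldl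
          (fun mat j =>
            let mat := pvSet2 mat i j (pvGet2 mat (i - 1) (j - 1))
            if ¬ (i < 2 * j) then
              pvSet2 mat i j (pvGet2 mat i j + pvGet2 mat (i - j) j)
            else mat)
          mat)
      (mkMat M N (fA N 0))
    = mkMat M N (fA N k) := by
  induction k with
  | zero =>
    rw [show ((0 : Nat) : Int) + 1 = 1 by norm_num,
      PySem.List.pyRange_one_eq_nil (a := 1) (b := 1) (by omega)]
    simp
  | succ k ih =>
    rw [show ((k + 1 : Nat) : Int) + 1 = ((k : Int) + 1) + 1 by push_cast; ring]
    rw [PySem.List.pyRange_one_succ_right (a := 1) (b := (k : Int) + 1) (by omega),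
      List.foldl_append]
    rw [ih (by omega)]
    simp only [List.foldl_cons, List.foldl_nil]
    rw [show min ((k : Int) + 1) (N : Int) = ((min (k + 1) N : Nat) : Int) by push_cast; ring]
    rw [A_inner M N k (by omega) (min (k + 1) N) (le_refl _)]
    refine mkMat_congr _ _ _ _ (fun i hi j hj => ?_)
    simp only [gA, fA]
    split_ifs <;> first | rfl | omega

theorem init_mk (M N : Nat) :
    (PySem.List.pyRange 0 ((M : Int) + 1) 1).map
      (fun _ => (PySem.List.pyRange 0 ((N : Int) + 1) 1).map (fun _ => (0 : Int)))
    = mkMat M N (fun _ _ => 0) := by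
  unfold mkMat
  rw [PySem.List.pyRange_one 0 ((M : Int) + 1), PySem.List.pyRange_one 0 ((N : Int) + 1)]
  rw [List.map_map, List.map_map]
  have eM : (((M : Int) + 1) - 0).toNat = M + 1 := by omega
  have eN : (((N : Int) + 1) - 0).toNat = N + 1 := by omega
  rw [eM, eN]
  rfl

theorem B_row0' (M N : Nat) :
    (PySem.List.pyRange 0 ((N : Int) + 1) 1).foldl (fun a j => pvSet2 a 0 j 1)
      (mkMat M N (fun _ _ => 0))
    = mkMat M N (fB 0) := by
  have h := B_row0 M N (N + 1) (le_refl _)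
  rw [show ((N + 1 : Nat) : Int) = (N : Int) + 1 by push_cast; ring] at h
  rw [h]
  refine mkMat_congr _ _ _ _ (fun i hi j hj => ?_)
  simp only [fB]
  by_cases h1 : i = 0 ∧ j < N + 1
  · rw [if_pos h1, if_pos (Or.inl (by omega))]
    obtain ⟨hi0, -⟩ := h1
    subst hi0
    rw [pM_zero_left]
  · rw [if_neg h1]
    by_cases h2 : i ≤ 0 ∨ j = 0
    · rw [if_pos h2]
      have hij : 1 ≤ i ∧ j = 0 := by
        rcases h2 with h2 | h2
        · exact absurd ⟨by omega, by omega⟩ h1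
        · refine ⟨?_, h2⟩
          by_contra hcon
          exact h1 ⟨by omega, by omega⟩
      obtain ⟨hi1, rfl⟩ := hij
      rw [pM_zero_right i hi1]
    · rw [if_neg h2]

theorem portA_eq (M N : Nat) :
    enum_partitions (M : Int) (N : Int) = mkMat M N (fA N M) := by
  have h0 : pvSet2 (mkMat M N (fun _ _ => 0)) 0 0 1 = mkMat M N (fA N 0) := by
    rw [set2_mk M N _ _ _ _ (by omega) (by omega) (by omega) (by omega)]
    refine mkMat_congr _ _ _ _ (fun i hi j hj => ?_)
    simp only [upd2, fA, Int.toNat_zero]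
    split_ifs <;> first | rfl | omega
  simp only [enum_partitions]
  rw [init_mk M N, h0]
  exact A_outer M N M (le_refl _)

theorem map_pyRange_mkMat (M N : Nat) (F : Int → Int → Int) :
    (PySem.List.pyRange 0 ((M : Int) + 1) 1).map
      (fun i => (PySem.List.pyRange 0 ((N : Int) + 1) 1).map (fun j => F i j))
    = mkMat M N (fun x y => F (x : Int) (y : Int)) := by
  unfold mkMat
  rw [PySem.List.pyRange_one 0 ((M : Int) + 1), PySem.List.pyRange_one 0 ((N : Int) + 1)]
  have eM : (((M : Int) + 1) - 0).toNat = M + 1 := by omega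
  have eN : (((N : Int) + 1) - 0).toNat = N + 1 := by omega
  rw [eM, eN, List.map_map]
  refine List.map_congr_left (fun x hx => ?_)
  rw [Function.comp_apply, List.map_map]
  refine List.map_congr_left (fun y hy => ?_)
  rw [Function.comp_apply, zero_add, zero_add]

theorem portB_eq (M N : Nat) :
    enum_partitions_alt (M : Int) (N : Int) = mkMat M N (fA N M) := by
  simp only [enum_partitions_alt]
  simp only [init_mk M N, B_row0' M N, B_outer M N M (le_refl M)]
  rw [map_pyRange_mkMat M N (fun i j =>
    if 1 ≤ j ∧ j ≤ min i (N : Int) then pvGet2 (mkMat M N (fB M)) (i - j) j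
    else if i = 0 ∧ j = 0 then 1 else 0)]
  refine mkMat_congr _ _ _ _ (fun x hxM y hyN => ?_)
  by_cases hc : 1 ≤ y ∧ y ≤ min x N
  · rw [if_pos (by push_cast; omega)]
    rw [get2_mk M N _ _ _ (by omega) (by omega) (by omega) (by omega)]
    have ex : ((x : Int) - (y : Int)).toNat = x - y := by omega
    have ey : ((y : Int)).toNat = y := by omega
    rw [ex, ey]
    simp only [fB, fA]
    rw [if_pos (by omega), if_neg (by omega), if_pos (by omega)]
    exact (pE_eq_pM x y (by omega) (by omega)).symm
  · rw [if_neg (by push_cast; omega)]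
    simp only [fA]
    split_ifs <;> omega

-- ===== VERDICT (by name: the statement is the Claim_ definition above) =====
theorem enum_partitions_spec : Claim_equal_enum_partitions := by
  intro m n hdom hpre
  obtain ⟨hm, hn⟩ := hpre
  unfold Spec_enum_partitions
  obtain ⟨M, rfl⟩ : ∃ M : Nat, m = (M : Int) := ⟨m.toNat, (Int.toNat_of_nonneg hm).symm⟩
  obtain ⟨N, rfl⟩ : ∃ N : Nat, n = (N : Int) := ⟨n.toNat, (Int.toNat_of_nonneg hn).symm⟩
  rw [portA_eq, portB_eq]
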